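-- pv_equiv track=rewrite | github.com/pylSER/Spider | Login.py | convertMoney
-- ===== SOURCE A (Python) =====
-- def convertMoney(money):
--     strlen=len(money)
--     i=0
--     newmoney=''
--     for i in range(strlen):
--         if(i==strlen-2):
--             newmoney+='.'
--         newmoney+=money[i]
--     return newmoney
-- ===== SOURCE B (Python) =====
-- def convertMoney(money):
--     if len(money) < 2:
--         return money
--     return money[:-2] + '.' + money[-2:]
-- ===== Notes on version B (the rewrite author's own statement) =====
-- stated objective: idiomatic
-- what changed: Replaces the char-by-char index loop that rebuilds the string one character at a time with a direct slice concatenation inserting the dot before the last two characters, guarded by len(money) < 2 where the loop inserts no dot.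
import Mathlib
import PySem

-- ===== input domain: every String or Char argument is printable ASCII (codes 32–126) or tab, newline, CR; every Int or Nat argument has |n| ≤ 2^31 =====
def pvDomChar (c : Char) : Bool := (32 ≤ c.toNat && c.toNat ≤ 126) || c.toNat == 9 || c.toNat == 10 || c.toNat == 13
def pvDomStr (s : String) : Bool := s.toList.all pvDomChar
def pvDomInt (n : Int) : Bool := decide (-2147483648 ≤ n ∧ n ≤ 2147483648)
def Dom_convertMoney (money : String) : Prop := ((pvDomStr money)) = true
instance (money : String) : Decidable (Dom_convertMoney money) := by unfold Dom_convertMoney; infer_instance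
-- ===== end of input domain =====

-- B replaces A's index loop with a slice concatenation (guarded for len < 2); idiomatic rewrite.

-- ===== PORT A =====
-- for i in range(strlen): if i==strlen-2: newmoney+='.' ; newmoney+=money[i]
def convertMoney (money : String) : String :=
  let cs := money.toList
  let strlen : Int := cs.length
  String.mk ((PySem.List.pyRange 0 strlen 1).foldl
    (fun newmoney i =>
      (if i = strlen - 2 then newmoney ++ ['.'] else newmoney)
        ++ [PySem.List.pyGetD cs i ' ']) [])

-- ===== PORT B =====
-- if len(money) < 2: return money ; return money[:-2] + '.' + money[-2:]
def convertMoney_alt (money : String) : String :=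
  let cs := money.toList
  if cs.length < 2 then money
  else String.mk (PySem.List.slice cs none (some (-2)) ++ '.' :: PySem.List.slice cs (some (-2)) none)

-- ===== PRECONDITION & SPEC =====
def Spec_convertMoney (money : String) (out : String) : Prop := out = convertMoney_alt money
instance (money : String) (out : String) : Decidable (Spec_convertMoney money out) := by unfold Spec_convertMoney; infer_instance

-- ===== CLAIM (what is proved, stated in full; the proofs are below) =====
def Claim_equal_convertMoney : Prop := ∀ (money : String), Dom_convertMoney money → Spec_convertMoney money (convertMoney money)

-- ===== LEMMAS AND PROOFS =====

lemma map_pyGetD_range_take (cs : List Char) (m : Nat) (hm : m ≤ cs.length) :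
    (PySem.List.pyRange 0 (m : Int) 1).map (fun j => PySem.List.pyGetD cs j ' ') = cs.take m := by
  apply List.ext_getElem
  · simp [PySem.List.length_pyRange_one]
    omega
  · intro k h1 h2
    simp only [List.getElem_map]
    rw [PySem.List.getElem_pyRange_one]
    have hk : k < m := by
      have := h1
      simp [PySem.List.length_pyRange_one] at this
      omega
    rw [show ((0 : Int) + k) = ((k : Nat) : Int) by push_cast; ring]
    rw [PySem.List.pyGetD_eq_getElem cs ' ' (by positivity) (by omega)]
    simp [List.getElem_take]

lemma foldl_main (cs : List Char) (hn : 2 ≤ cs.length) :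
    (PySem.List.pyRange 0 (cs.length : Int) 1).foldl
      (fun newmoney i =>
        (if i = (cs.length : Int) - 2 then newmoney ++ ['.'] else newmoney)
          ++ [PySem.List.pyGetD cs i ' ']) []
    = cs.take (cs.length - 2) ++ '.' :: cs.drop (cs.length - 2) := by
  set n := cs.length with hN
  have hsplit : PySem.List.pyRange 0 (n : Int) 1
      = PySem.List.pyRange 0 ((n : Int) - 2) 1 ++ PySem.List.pyRange ((n : Int) - 2) (n : Int) 1 :=
    PySem.List.pyRange_one_append 0 ((n : Int) - 2) (n : Int) (by omega) (by omega)
  have htail : PySem.List.pyRange ((n : Int) - 2) (n : Int) 1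
      = [(n : Int) - 2, (n : Int) - 1] := by
    rw [PySem.List.pyRange_one_cons (by omega), PySem.List.pyRange_one_cons (by omega)]
    rw [show (n : Int) - 2 + 1 = (n : Int) - 1 by ring,
        show (n : Int) - 1 + 1 = (n : Int) by ring]
    rw [PySem.List.pyRange_one_eq_nil le_rfl]
  have hne : ((n : Int) - 1) ≠ (n : Int) - 2 := by omega
  rw [hsplit, List.foldl_append, htail]
  simp only [List.foldl_cons, List.foldl_nil, if_neg hne]
  have hcongr : (PySem.List.pyRange 0 ((n : Int) - 2) 1).foldl
      (fun newmoney i =>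
        (if i = (n : Int) - 2 then newmoney ++ ['.'] else newmoney)
          ++ [PySem.List.pyGetD cs i ' ']) []
      = (PySem.List.pyRange 0 ((n : Int) - 2) 1).foldl
          (fun newmoney i => newmoney ++ [PySem.List.pyGetD cs i ' ']) [] := by
    apply PySem.List.foldl_congr_mem
    intro acc i hi
    have hmem := (PySem.List.mem_pyRange_one).1 hi
    have hii : i ≠ (n : Int) - 2 := by omega
    simp [hii]
  rw [hcongr, PySem.List.foldl_append_singleton_eq_map]
  rw [show ((n : Int) - 2) = ((n - 2 : Nat) : Int) by omega,
      map_pyGetD_range_take cs (n - 2) (by omega)]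
  have e1 : PySem.List.pyGetD cs (((n - 2 : Nat) : Int)) ' ' = cs[n - 2]'(by omega) := by
    rw [PySem.List.pyGetD_eq_getElem cs ' ' (by positivity) (by omega)]
    simp
  have e2 : PySem.List.pyGetD cs ((n : Int) - 1) ' ' = cs[n - 1]'(by omega) := by
    rw [show ((n : Int) - 1) = ((n - 1 : Nat) : Int) by omega]
    rw [PySem.List.pyGetD_eq_getElem cs ' ' (by positivity) (by omega)]
    simp
  rw [e1, e2]
  have hdrop : cs.drop (n - 2) = [cs[n - 2]'(by omega), cs[n - 1]'(by omega)] := by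
    apply List.ext_getElem
    · simp; omega
    · intro k h1 h2
      simp at h2
      interval_cases k <;> simp <;> (congr 1; omega)
  rw [hdrop]
  simp

lemma small_case (cs : List Char) (hn : cs.length < 2) :
    (PySem.List.pyRange 0 (cs.length : Int) 1).foldl
      (fun newmoney i =>
        (if i = (cs.length : Int) - 2 then newmoney ++ ['.'] else newmoney)
          ++ [PySem.List.pyGetD cs i ' ']) [] = cs := by
  interval_cases h : cs.length
  · simp [List.length_eq_zero_iff.1 h, PySem.List.pyRange_one_eq_nil]
  · obtain ⟨c, hc⟩ := List.length_eq_one_iff.1 h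
    subst hc
    rw [show ((1 : Nat) : Int) = 0 + 1 by ring, PySem.List.pyRange_one_singleton]
    norm_num [PySem.List.pyGetD_zero_cons]

-- ===== VERDICT (by name: the statement is the Claim_ definition above) =====
theorem convertMoney_spec : Claim_equal_convertMoney := by
  intro money _
  unfold Spec_convertMoney convertMoney convertMoney_alt
  show String.mk ((PySem.List.pyRange 0 (money.toList.length : Int) 1).foldl
      (fun newmoney i =>
        (if i = (money.toList.length : Int) - 2 then newmoney ++ ['.'] else newmoney)
          ++ [PySem.List.pyGetD money.toList i ' ']) [])
    = if money.toList.length < 2 then money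
      else String.mk (PySem.List.slice money.toList none (some (-2))
            ++ '.' :: PySem.List.slice money.toList (some (-2)) none)
  by_cases h : money.toList.length < 2
  · rw [if_pos h, small_case money.toList h]
    exact String.ofList_toList
  · rw [if_neg h]
    rw [foldl_main money.toList (by omega)]
    rw [PySem.List.slice_to_neg_ofNat money.toList 2 (by omega),
        PySem.List.slice_from_neg_ofNat money.toList 2 (by omega)]
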